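-- pv_equiv track=rewrite | github.com/rbrt1022/alga_a_gyakban_gyak | Roads In Hackerland.py | roadsInHackerland
-- ===== SOURCE A (Python) =====
-- def roadsInHackerland(n, roads):
--     roads.sort(key=lambda x: x[2])
--
--     parent = list(range(n + 1))
--
--     def find(i):
--         if parent[i] == i:
--             return i
--         parent[i] = find(parent[i])
--         return parent[i]
--
--     def union(i, j):
--         root_i = find(i)
--         root_j = find(j)
--         if root_i != root_j:
--             parent[root_i] = root_j
--             return True
--         return False
--
--     mst_adj = [[] for _ in range(n + 1)]
--     edges_count = 0
--
--     for u, v, c in roads: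
--         if union(u, v):
--             mst_adj[u].append((v, c))
--             mst_adj[v].append((u, c))
--             edges_count += 1
--             if edges_count == n - 1:
--                 break
--
--     weights = {}
--
--     def dfs(u, p):
--         subtree_size = 1
--         for v, c in mst_adj[u]:
--             if v != p:
--                 child_size = dfs(v, u)
--                 paths = child_size * (n - child_size)
--                 weights[c] = weights.get(c, 0) + paths
--                 subtree_size += child_size
--         return subtree_size
--
--     dfs(1, -1)
--
--     result = []
--     carry = 0
--     i = 0
--
--     while weights or carry:
--         val = weights.pop(i, 0) + carry
--         result.append(str(val % 2))
--         carry = val // 2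
--         i += 1
--
--     return "".join(result[::-1])
-- ===== SOURCE B (Python) =====
-- def roadsInHackerland(n, roads):
--     order = sorted(roads, key=lambda e: e[2])
--
--     parent = list(range(n + 1))
--
--     def find(i):
--         if parent[i] == i:
--             return i
--         parent[i] = find(parent[i])
--         return parent[i]
--
--     def union(i, j):
--         ri, rj = find(i), find(j)
--         if ri != rj:
--             parent[ri] = rj
--             return True
--         return False
--
--     mst_adj = [[] for _ in range(n + 1)]
--     cnt = 0
--     for u, v, c in order:
--         if union(u, v):
--             mst_adj[u].append((v, c))
--             mst_adj[v].append((u, c))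
--             cnt += 1
--             if cnt == n - 1:
--                 break
--
--     # subtree sizes via an explicit stack machine (iterative post-order),
--     # contributions collected as a flat (cost, pair-count) list
--     contribs = []
--     stack = [[1, -1, 0, 1, 0]]  # node, parent, next child index, size, cost of edge to parent
--     while stack:
--         top = stack[-1]
--         u, p, i = top[0], top[1], top[2]
--         children = mst_adj[u]
--         if i < len(children):
--             top[2] = i + 1
--             v, c = children[i]
--             if v != p:
--                 stack.append([v, u, 0, 1, c])
--         else:
--             stack.pop()
--             if stack:
--                 s = top[3]
--                 contribs.append((top[4], s * (n - s)))
--                 stack[-1][3] += s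
--
--     # binary digits straight off the cost-sorted contribution list,
--     # least significant digit first
--     contribs.sort(key=lambda t: t[0])
--     digits = []
--     carry = 0
--     e = 0
--     while contribs or carry:
--         val = carry
--         while contribs and contribs[0][0] == e:
--             val += contribs.pop(0)[1]
--         digits.append(str(val % 2))
--         carry = val // 2
--         e += 1
--     return "".join(reversed(digits))
-- ===== Notes on version B (the rewrite author's own statement) =====
-- stated objective: alternative
-- what changed: The recursive dict-mutating DFS is replaced by an explicit stack machine (iterative post-order over frames) that emits a flat list of (cost, pair-count) contributions, and the per-exponent weights dict with A's open-ended pop/carry while-loop is replaced by sorting that contribution list by cost once and emitting the binary digits in a single grouped scan with a carry; the sort and the union-find MST construction are kept.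
-- outside the precondition, e.g. on roadsInHackerland(2, [[1, 2, 0], [2, 2, -4]]): A returns '1', B returns '1'; on roadsInHackerland(2, [[-1, 1, 3]]): A returns '', B returns ''
import Mathlib
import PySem

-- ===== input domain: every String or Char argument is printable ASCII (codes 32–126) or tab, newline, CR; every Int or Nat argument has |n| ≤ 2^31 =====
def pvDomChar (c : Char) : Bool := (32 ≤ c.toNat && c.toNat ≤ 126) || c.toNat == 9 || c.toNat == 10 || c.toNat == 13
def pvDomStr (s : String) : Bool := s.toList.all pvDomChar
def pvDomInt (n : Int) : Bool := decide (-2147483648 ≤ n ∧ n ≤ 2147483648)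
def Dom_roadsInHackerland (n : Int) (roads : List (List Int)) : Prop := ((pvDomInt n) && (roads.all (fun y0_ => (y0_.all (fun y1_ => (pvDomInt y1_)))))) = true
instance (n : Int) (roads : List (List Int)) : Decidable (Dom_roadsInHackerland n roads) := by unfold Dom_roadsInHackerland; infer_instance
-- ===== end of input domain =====

-- B replaces A's recursive dict-mutating DFS by an explicit stack machine collecting a
-- flat (cost, pair-count) contribution list, and replaces A's weights dict plus
-- open-ended pop/carry while-loop by one cost-sorted scan of that list emitting the
-- binary digits; the sort and the union-find MST construction are kept.  Equivalence
-- is about the RETURN value only: A sorts `roads` in place, B does not mutate it.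

-- ===== PORT A =====

-- key=lambda x: x[2]  (x[2] raises on rows shorter than 3 — excluded by Pre_; exact there)
def pvKey (r : List Int) : Int := PySem.List.pyGetD r 2 0

-- recursive find with path compression; fuel n+2 covers any parent chain over the
-- n+1 nodes (the recursion is not structural).  Indices are in 0..n under Pre_.
def pvFind : Nat → List Int → Int → Int × List Int
  | 0, par, i => (i, par)
  | f + 1, par, i =>
    let pi := par.getD i.toNat 0
    if pi = i then (i, par)
    else
      let rp := pvFind f par pi
      (rp.1, rp.2.set i.toNat rp.1)

def pvUnion (f : Nat) (par : List Int) (i j : Int) : Bool × List Int :=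
  let a := pvFind f par i
  let b := pvFind f a.2 j
  if a.1 ≠ b.1 then (true, b.2.set a.1.toNat b.1) else (false, b.2)

-- the Kruskal loop (identical in A and B, including the `break` at n-1 edges);
-- rows have exactly 3 entries under Pre_, so `getD` is exact for the unpacking
def pvKruskal (n : Int) : List (List Int) → List Int → List (List (Int × Int)) → Int → List (List (Int × Int))
  | [], _, adj, _ => adj
  | row :: rest, par, adj, cnt =>
    let u := row.getD 0 0
    let v := row.getD 1 0
    let c := row.getD 2 0
    let ub := pvUnion (n.toNat + 2) par u v
    if ub.1 then
      let adj1 := adj.set u.toNat (adj.getD u.toNat [] ++ [(v, c)])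
      let adj2 := adj1.set v.toNat (adj1.getD v.toNat [] ++ [(u, c)])
      if cnt + 1 = n - 1 then adj2
      else pvKruskal n rest ub.2 adj2 (cnt + 1)
    else pvKruskal n rest ub.2 adj cnt

-- the body of A's dfs loop over mst_adj[u] (dfs is the recursive call)
def pvStepA (nn : Int) (dfs : Int → PySem.Dict Int Int → Int × PySem.Dict Int Int)
    (p : Int) (acc : Int × PySem.Dict Int Int) (vc : Int × Int) : Int × PySem.Dict Int Int :=
  if vc.1 ≠ p then
    let sw := dfs vc.1 acc.2
    (acc.1 + sw.1, sw.2.modify vc.2 0 (· + sw.1 * (nn - sw.1)))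
  else acc

-- A's dfs, threading the weights dict; fuel n+2 covers the tree depth
def pvDfsA (nn : Int) (adj : List (List (Int × Int))) : Nat → Int → Int → PySem.Dict Int Int → Int × PySem.Dict Int Int
  | 0, _, _, w => (1, w)
  | f + 1, u, p, w =>
    (adj.getD u.toNat []).foldl (pvStepA nn (fun v w' => pvDfsA nn adj f v u w') p) (1, w)

-- A's `while weights or carry` loop; `weights.pop(i, 0)` = getD + erase
def pvCarryA : Nat → PySem.Dict Int Int → Int → Int → List String
  | 0, _, _, _ => []
  | f + 1, w, carry, i =>
    if w.items = [] ∧ carry = 0 then []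
    else
      let val := w.getD i 0 + carry
      PySem.Int.toStr (PySem.Int.mod val 2) ::
        pvCarryA f (w.erase i) (PySem.Int.floordiv val 2) (i + 1)

-- fuel for A's loop: (max key + 1) iterations empty the dict, and the value sum
-- bounds the remaining carry-flush iterations (scaffolding only; the loop body
-- is the transliteration above)
def pvG (w : PySem.Dict Int Int) : Nat := w.items.foldl (fun a kv => a + kv.2.toNat) 0 + 1
def pvMaxKeyNat (w : PySem.Dict Int Int) : Nat := ((PySem.List.max? w.keys (fun x => x)).getD 0).toNat
def pvFuelA (w : PySem.Dict Int Int) : Nat := (pvMaxKeyNat w + 1) + pvG w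

def roadsInHackerland (n : Int) (roads : List (List Int)) : String :=
  let sortedRoads := PySem.List.sorted roads pvKey
  let par0 : List Int := PySem.List.pyRange 0 (n + 1)
  let adj0 : List (List (Int × Int)) := List.replicate (n + 1).toNat []
  let adj := pvKruskal n sortedRoads par0 adj0 0
  let w := (pvDfsA n adj (n.toNat + 2) 1 (-1) PySem.Dict.empty).2
  let res := pvCarryA (pvFuelA w) w 0 0
  PySem.Str.join "" res.reverse   -- "".join(reversed(digits)) / result[::-1]

-- ===== PORT B =====

-- B's stack machine frames are (node, parent, next child index, size, cost to parent)
-- plus a Lean-side depth budget (last component) that plays the role of A's port's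
-- recursion fuel: the Python loop is unbounded, the budget n+2 covers the tree depth.
-- The weight functions below only justify termination of the loop to Lean.
def pvL (adj : List (List (Int × Int))) : Nat := adj.foldl (fun m x => max m x.length) 0

def pvGW (L : Nat) : Nat → Nat
  | 0 => 1
  | e + 1 => L * (pvGW L e + 1) + 1

def pvFW (adj : List (List (Int × Int))) : Int × Int × Nat × Int × Int × Nat → Nat
  | (u, _, i, _, _, d) =>
    match d with
    | 0 => 1
    | e + 1 => ((adj.getD u.toNat []).length - i) * (pvGW (pvL adj) e + 1) + 1

def pvStackW (adj : List (List (Int × Int))) (st : List (Int × Int × Nat × Int × Int × Nat)) : Nat :=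
  (st.map (pvFW adj)).sum

lemma pv_foldl_max_init_le (l : List (List (Int × Int))) : ∀ a : Nat, a ≤ l.foldl (fun m x => max m x.length) a := by
  induction l with
  | nil => intro a; simp
  | cons x t ih => intro a; exact le_trans (le_max_left a x.length) (ih _)

lemma pv_mem_le_foldl_max (l : List (List (Int × Int))) : ∀ (a : Nat) (x : List (Int × Int)), x ∈ l → x.length ≤ l.foldl (fun m y => max m y.length) a := by
  induction l with
  | nil => intro a x hx; simp at hx
  | cons y t ih =>
    intro a x hx
    rcases List.mem_cons.1 hx with h | h
    · subst h
      exact le_trans (le_max_right a x.length) (pv_foldl_max_init_le t _)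
    · exact ih _ x h

lemma pv_len_le_pvL (adj : List (List (Int × Int))) (u : Nat) : (adj.getD u []).length ≤ pvL adj := by
  by_cases h : u < adj.length
  · rw [List.getD_eq_getElem _ _ h]
    exact pv_mem_le_foldl_max adj 0 _ (adj.getElem_mem h)
  · rw [List.getD_eq_default _ _ (by omega)]
    simp

lemma pvFW_fresh_le (adj : List (List (Int × Int))) (v u c : Int) (e : Nat) :
    pvFW adj (v, u, 0, 1, c, e) ≤ pvGW (pvL adj) e := by
  cases e with
  | zero => simp [pvFW, pvGW]
  | succ e =>
    show ((adj.getD v.toNat []).length - 0) * (pvGW (pvL adj) e + 1) + 1 ≤ pvL adj * (pvGW (pvL adj) e + 1) + 1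
    have := pv_len_le_pvL adj v.toNat
    exact Nat.add_le_add_right (Nat.mul_le_mul_right _ (by omega)) 1

lemma pvFW_pos (adj : List (List (Int × Int))) (fr : Int × Int × Nat × Int × Int × Nat) : 1 ≤ pvFW adj fr := by
  rcases fr with ⟨u, p, i, s, c, d⟩
  cases d <;> simp [pvFW]

lemma pvFW_step (adj : List (List (Int × Int))) (u p p' : Int) (i : Nat) (s c s' c' : Int) (e : Nat)
    (h : i < (adj.getD u.toNat []).length) :
    pvFW adj (u, p, i, s, c, e + 1) = pvFW adj (u, p', i + 1, s', c', e + 1) + (pvGW (pvL adj) e + 1) := by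
  show ((adj.getD u.toNat []).length - i) * (pvGW (pvL adj) e + 1) + 1
      = (((adj.getD u.toNat []).length - (i + 1)) * (pvGW (pvL adj) e + 1) + 1) + (pvGW (pvL adj) e + 1)
  have h1 : (adj.getD u.toNat []).length - i = ((adj.getD u.toNat []).length - (i + 1)) + 1 := by omega
  rw [h1, Nat.succ_mul]
  omega

lemma pvFW_size_irrel (adj : List (List (Int × Int))) (u p : Int) (i : Nat) (s s' c : Int) (d : Nat) :
    pvFW adj (u, p, i, s, c, d) = pvFW adj (u, p, i, s', c, d) := by
  cases d <;> rfl

-- the while-loop of B's explicit-stack post-order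
def pvMachine (nn : Int) (adj : List (List (Int × Int))) :
    List (Int × Int × Nat × Int × Int × Nat) → List (Int × Int) → List (Int × Int)
  | [], acc => acc
  | (u, p, i, s, c, d) :: rest, acc =>
    if h : i < (adj.getD u.toNat []).length ∧ 0 < d then
      let vc := (adj.getD u.toNat []).getD i (0, 0)
      if vc.1 ≠ p then
        pvMachine nn adj ((vc.1, u, 0, 1, vc.2, d - 1) :: (u, p, i + 1, s, c, d) :: rest) acc
      else
        pvMachine nn adj ((u, p, i + 1, s, c, d) :: rest) acc
    else
      match rest with
      | [] => acc
      | (u2, p2, i2, s2, c2, d2) :: rs =>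
        pvMachine nn adj ((u2, p2, i2, s2 + s, c2, d2) :: rs) (acc ++ [(c, s * (nn - s))])
  termination_by st _ => pvStackW adj st
  decreasing_by
  · obtain ⟨h1, h2⟩ := h
    obtain ⟨e, rfl⟩ : ∃ e, d = e + 1 := ⟨d - 1, by omega⟩
    simp only [pvStackW, List.map_cons, List.sum_cons, Nat.add_sub_cancel]
    have hc := pvFW_fresh_le adj ((adj.getD u.toNat []).getD i (0, 0)).1 u
      ((adj.getD u.toNat []).getD i (0, 0)).2 e
    have hs := pvFW_step adj u p p i s c s c e h1
    omega
  · obtain ⟨h1, h2⟩ := h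
    obtain ⟨e, rfl⟩ : ∃ e, d = e + 1 := ⟨d - 1, by omega⟩
    simp only [pvStackW, List.map_cons, List.sum_cons]
    have hs := pvFW_step adj u p p i s c s c e h1
    omega
  · simp only [pvStackW, List.map_cons, List.sum_cons]
    have h1 := pvFW_size_irrel adj u2 p2 i2 (s2 + s) s2 c2 d2
    have h2 := pvFW_pos adj (u, p, i, s, c, d)
    omega

-- weights[c] = weights.get(c, 0) + paths  (shared helper: A's dict is this fold of
-- the contribution list; B's port uses it only to compute the Lean-side loop fuel)
def pvUpd (d : PySem.Dict Int Int) (cp : Int × Int) : PySem.Dict Int Int :=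
  d.modify cp.1 0 (· + cp.2)

-- the inner `while contribs and contribs[0][0] == e: val += contribs.pop(0)[1]`
def pvConsume (e : Int) : List (Int × Int) → Int → Int × List (Int × Int)
  | [], val => (val, [])
  | (c, p) :: rest, val => if c = e then pvConsume e rest (val + p) else (val, (c, p) :: rest)

-- B's outer `while contribs or carry` digit loop (fuel is Lean-side only, like A's)
def pvEmit : Nat → List (Int × Int) → Int → Int → List String
  | 0, _, _, _ => []
  | f + 1, sc, carry, e =>
    if sc = [] ∧ carry = 0 then []
    else
      let r := pvConsume e sc carry
      PySem.Int.toStr (PySem.Int.mod r.1 2) :: pvEmit f r.2 (PySem.Int.floordiv r.1 2) (e + 1)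

def roadsInHackerland_alt (n : Int) (roads : List (List Int)) : String :=
  let order := PySem.List.sorted roads pvKey
  let par0 : List Int := PySem.List.pyRange 0 (n + 1)
  let adj0 : List (List (Int × Int)) := List.replicate (n + 1).toNat []
  let adj := pvKruskal n order par0 adj0 0   -- find/union/Kruskal are identical in Source B
  let contribs := pvMachine n adj [(1, -1, 0, 1, 0, n.toNat + 2)] []
  let sc := PySem.List.sorted contribs (fun t => t.1)
  PySem.Str.join "" (pvEmit (pvFuelA (sc.foldl pvUpd PySem.Dict.empty)) sc 0 0).reverse

-- ===== PRECONDITION & SPEC =====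

-- Pre_ restricts to the task's natural domain: n ≥ 1, rows of exactly three entries,
-- endpoints in 0..n and non-negative costs.  Outside it A raises (IndexError on
-- out-of-range endpoints, ValueError unpacking rows of other lengths, n < 1) or can
-- loop forever (a negative-cost edge reaching node 1's MST component); on the few
-- excluded inputs where A still returns (in-range negative endpoints wrapping
-- around, a never-connected negative-cost edge) B's Python returns the same value.
def Pre_roadsInHackerland (n : Int) (roads : List (List Int)) : Prop :=
  1 ≤ n ∧ ∀ r ∈ roads, r.length = 3 ∧
    0 ≤ r.getD 0 0 ∧ r.getD 0 0 ≤ n ∧ 0 ≤ r.getD 1 0 ∧ r.getD 1 0 ≤ n ∧ 0 ≤ r.getD 2 0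

instance (n : Int) (roads : List (List Int)) : Decidable (Pre_roadsInHackerland n roads) := by
  unfold Pre_roadsInHackerland; infer_instance

def pvWitness_roadsInHackerland : Int × List (List Int) := (3, [[1, 2, 1], [2, 3, 2]])

def Spec_roadsInHackerland (n : Int) (roads : List (List Int)) (out : String) : Prop := out = roadsInHackerland_alt n roads
instance (n : Int) (roads : List (List Int)) (out : String) : Decidable (Spec_roadsInHackerland n roads out) := by unfold Spec_roadsInHackerland; infer_instance

-- ===== CLAIM (what is proved, stated in full; the proofs are below) =====
def Claim_equal_roadsInHackerland : Prop := ∀ (n : Int) (roads : List (List Int)), Dom_roadsInHackerland n roads → Pre_roadsInHackerland n roads → Spec_roadsInHackerland n roads (roadsInHackerland n roads)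

-- ===== LEMMAS AND PROOFS =====

-- ---- the reference recursion: A's dfs with the contributions kept as a pure list ----

def pvStepR (nn : Int) (rec : Int → Int × List (Int × Int)) (p : Int)
    (acc : Int × List (Int × Int)) (vc : Int × Int) : Int × List (Int × Int) :=
  if vc.1 ≠ p then
    let r := rec vc.1
    (acc.1 + r.1, acc.2 ++ r.2 ++ [(vc.2, r.1 * (nn - r.1))])
  else acc

def pvDfsR (nn : Int) (adj : List (List (Int × Int))) : Nat → Int → Int → Int × List (Int × Int)
  | 0, _, _ => (1, [])
  | d + 1, u, p => (adj.getD u.toNat []).foldl (pvStepR nn (fun v => pvDfsR nn adj d v u) p) (1, [])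

-- A's dict-threading dfs equals the reference recursion plus a dict fold
lemma pv_step_fold (nn p : Int) (dA : Int → PySem.Dict Int Int → Int × PySem.Dict Int Int)
    (dB : Int → Int × List (Int × Int))
    (hrec : ∀ v w, dA v w = ((dB v).1, (dB v).2.foldl pvUpd w)) :
    ∀ (l : List (Int × Int)) (s : Int) (cl : List (Int × Int)) (w : PySem.Dict Int Int),
      l.foldl (pvStepA nn dA p) (s, cl.foldl pvUpd w) =
        ((l.foldl (pvStepR nn dB p) (s, cl)).1,
         (l.foldl (pvStepR nn dB p) (s, cl)).2.foldl pvUpd w) := by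
  intro l
  induction l with
  | nil => intro s cl w; rfl
  | cons vc l ih =>
    intro s cl w
    by_cases h : vc.1 = p
    · simp only [List.foldl_cons, pvStepA, pvStepR, h, ne_eq, not_true_eq_false, if_false]
      exact ih s cl w
    · simp only [List.foldl_cons, pvStepA, pvStepR, ne_eq, h, not_false_eq_true, if_true,
        hrec vc.1 (cl.foldl pvUpd w)]
      have harr : ((dB vc.1).2.foldl pvUpd (cl.foldl pvUpd w)).modify vc.2 0
            (· + (dB vc.1).1 * (nn - (dB vc.1).1)) =
          (cl ++ (dB vc.1).2 ++ [(vc.2, (dB vc.1).1 * (nn - (dB vc.1).1))]).foldl pvUpd w := by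
        rw [List.foldl_append, List.foldl_append]
        rfl
      rw [harr]
      exact ih (s + (dB vc.1).1) (cl ++ (dB vc.1).2 ++ [(vc.2, (dB vc.1).1 * (nn - (dB vc.1).1))]) w

lemma pv_dfs_rel (f : Nat) (nn : Int) (adj : List (List (Int × Int))) :
    ∀ (u p : Int) (w : PySem.Dict Int Int),
      pvDfsA nn adj f u p w =
        ((pvDfsR nn adj f u p).1, (pvDfsR nn adj f u p).2.foldl pvUpd w) := by
  induction f with
  | zero => intro u p w; rfl
  | succ f ih =>
    intro u p w
    simp only [pvDfsA, pvDfsR]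
    have := pv_step_fold nn p (fun v w' => pvDfsA nn adj f v u w') (fun v => pvDfsR nn adj f v u)
      (fun v w' => ih v u w') (adj.getD u.toNat []) 1 [] w
    simpa using this

-- ---- the machine computes the reference recursion's contribution list ----

-- what remains of a frame: finish its child loop from index i with partial size s
def pvResid (nn : Int) (adj : List (List (Int × Int))) (d : Nat) (u p : Int) (i : Nat) (s : Int) :
    Int × List (Int × Int) :=
  match d with
  | 0 => (s, [])
  | d' + 1 => ((adj.getD u.toNat []).drop i).foldl (pvStepR nn (fun v => pvDfsR nn adj d' v u) p) (s, [])

lemma pv_resid_full (nn : Int) (adj : List (List (Int × Int))) (e : Nat) (v u : Int) :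
    pvResid nn adj e v u 0 1 = pvDfsR nn adj e v u := by
  cases e <;> rfl

lemma pv_foldR_shift (nn p : Int) (rec : Int → Int × List (Int × Int)) :
    ∀ (l : List (Int × Int)) (σ : Int) (pre : List (Int × Int)),
      l.foldl (pvStepR nn rec p) (σ, pre) =
        ((l.foldl (pvStepR nn rec p) (σ, [])).1, pre ++ (l.foldl (pvStepR nn rec p) (σ, [])).2) := by
  intro l
  induction l with
  | nil => intro σ pre; simp
  | cons vc l ih =>
    intro σ pre
    by_cases h : vc.1 = p
    · simp only [List.foldl_cons, pvStepR, h, ne_eq, not_true_eq_false, if_false]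
      exact ih σ pre
    · simp only [List.foldl_cons, pvStepR, ne_eq, h, not_false_eq_true, if_true]
      rw [ih _ (pre ++ (rec vc.1).2 ++ [(vc.2, (rec vc.1).1 * (nn - (rec vc.1).1))]),
        ih _ ([] ++ (rec vc.1).2 ++ [(vc.2, (rec vc.1).1 * (nn - (rec vc.1).1))])]
      simp [List.append_assoc]

lemma pv_machine_eq (nn : Int) (adj : List (List (Int × Int))) :
    ∀ (W : Nat) (u p : Int) (i : Nat) (s c : Int) (d : Nat)
      (rest : List (Int × Int × Nat × Int × Int × Nat)) (acc : List (Int × Int)),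
      pvStackW adj ((u, p, i, s, c, d) :: rest) ≤ W →
      pvMachine nn adj ((u, p, i, s, c, d) :: rest) acc =
        match rest with
        | [] => acc ++ (pvResid nn adj d u p i s).2
        | (u2, p2, i2, s2, c2, d2) :: rs =>
          pvMachine nn adj ((u2, p2, i2, s2 + (pvResid nn adj d u p i s).1, c2, d2) :: rs)
            (acc ++ (pvResid nn adj d u p i s).2 ++
              [(c, (pvResid nn adj d u p i s).1 * (nn - (pvResid nn adj d u p i s).1))]) := by
  intro W
  induction W with
  | zero =>
    intro u p i s c d rest acc hW
    exfalso
    have := pvFW_pos adj (u, p, i, s, c, d)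
    simp only [pvStackW, List.map_cons, List.sum_cons] at hW
    omega
  | succ W ihW =>
    intro u p i s c d rest acc hW
    by_cases hg : i < (adj.getD u.toNat []).length ∧ 0 < d
    · obtain ⟨e, rfl⟩ : ∃ e, d = e + 1 := ⟨d - 1, by omega⟩
      have hdrop : (adj.getD u.toNat []).drop i =
          (adj.getD u.toNat []).getD i (0, 0) :: (adj.getD u.toNat []).drop (i + 1) := by
        rw [List.getD_eq_getElem _ _ hg.1]
        exact List.drop_eq_getElem_cons hg.1
      by_cases hvp : ((adj.getD u.toNat []).getD i (0, 0)).1 = p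
      · -- the scanned entry is the parent: the machine just advances the index
        rw [pvMachine.eq_def]
        dsimp only
        rw [dif_pos hg, if_neg (by simpa using hvp)]
        have hle : pvStackW adj ((u, p, i + 1, s, c, e + 1) :: rest) ≤ W := by
          have hs := pvFW_step adj u p p i s c s c e hg.1
          simp only [pvStackW, List.map_cons, List.sum_cons] at hW ⊢
          omega
        rw [ihW u p (i + 1) s c (e + 1) rest acc hle]
        have hres : pvResid nn adj (e + 1) u p i s = pvResid nn adj (e + 1) u p (i + 1) s := by
          show ((adj.getD u.toNat []).drop i).foldl _ (s, []) =
            ((adj.getD u.toNat []).drop (i + 1)).foldl _ (s, [])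
          rw [hdrop, List.foldl_cons]
          have hstep : pvStepR nn (fun v => pvDfsR nn adj e v u) p (s, [])
              ((adj.getD u.toNat []).getD i (0, 0)) = (s, []) := by
            simp only [pvStepR, ne_eq, hvp, not_true_eq_false, if_false]
          rw [hstep]
        rw [hres]
      · -- a child entry: the machine pushes a fresh frame for it
        rw [pvMachine.eq_def]
        dsimp only
        rw [dif_pos hg, if_pos (by simpa using hvp)]
        simp only [Nat.add_sub_cancel]
        have hle1 : pvStackW adj
            ((((adj.getD u.toNat []).getD i (0, 0)).1, u, 0, 1, ((adj.getD u.toNat []).getD i (0, 0)).2, e) ::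
              (u, p, i + 1, s, c, e + 1) :: rest) ≤ W := by
          have hc := pvFW_fresh_le adj ((adj.getD u.toNat []).getD i (0, 0)).1 u
            ((adj.getD u.toNat []).getD i (0, 0)).2 e
          have hs := pvFW_step adj u p p i s c s c e hg.1
          simp only [pvStackW, List.map_cons, List.sum_cons] at hW ⊢
          omega
        rw [ihW _ u 0 1 _ e _ acc hle1]
        dsimp only
        rw [pv_resid_full]
        have hle2 : pvStackW adj
            ((u, p, i + 1, s + (pvDfsR nn adj e ((adj.getD u.toNat []).getD i (0, 0)).1 u).1, c, e + 1)
              :: rest) ≤ W := by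
          have hs := pvFW_step adj u p p i s c s c e hg.1
          have hirr := pvFW_size_irrel adj u p (i + 1)
            (s + (pvDfsR nn adj e ((adj.getD u.toNat []).getD i (0, 0)).1 u).1) s c (e + 1)
          simp only [pvStackW, List.map_cons, List.sum_cons] at hW ⊢
          omega
        rw [ihW u p (i + 1) _ c (e + 1) rest _ hle2]
        have hres : pvResid nn adj (e + 1) u p i s =
            ((pvResid nn adj (e + 1) u p (i + 1)
                (s + (pvDfsR nn adj e ((adj.getD u.toNat []).getD i (0, 0)).1 u).1)).1,
              (pvDfsR nn adj e ((adj.getD u.toNat []).getD i (0, 0)).1 u).2 ++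
                [(((adj.getD u.toNat []).getD i (0, 0)).2,
                  (pvDfsR nn adj e ((adj.getD u.toNat []).getD i (0, 0)).1 u).1 *
                    (nn - (pvDfsR nn adj e ((adj.getD u.toNat []).getD i (0, 0)).1 u).1))] ++
              (pvResid nn adj (e + 1) u p (i + 1)
                (s + (pvDfsR nn adj e ((adj.getD u.toNat []).getD i (0, 0)).1 u).1)).2) := by
          show ((adj.getD u.toNat []).drop i).foldl _ (s, []) = _
          rw [hdrop, List.foldl_cons]
          have hstep : pvStepR nn (fun v => pvDfsR nn adj e v u) p (s, [])
              ((adj.getD u.toNat []).getD i (0, 0)) =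
              (s + (pvDfsR nn adj e ((adj.getD u.toNat []).getD i (0, 0)).1 u).1,
                [] ++ (pvDfsR nn adj e ((adj.getD u.toNat []).getD i (0, 0)).1 u).2 ++
                [(((adj.getD u.toNat []).getD i (0, 0)).2,
                  (pvDfsR nn adj e ((adj.getD u.toNat []).getD i (0, 0)).1 u).1 *
                    (nn - (pvDfsR nn adj e ((adj.getD u.toNat []).getD i (0, 0)).1 u).1))]) := by
            simp only [pvStepR, ne_eq, hvp, not_false_eq_true, if_true]
          rw [hstep, List.nil_append,
            pv_foldR_shift nn p (fun v => pvDfsR nn adj e v u) ((adj.getD u.toNat []).drop (i + 1))]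
          rfl
        rw [hres]
        cases rest with
        | nil => simp [List.append_assoc]
        | cons fr2 rs =>
          obtain ⟨u2, p2, i2, s2, c2, d2⟩ := fr2
          simp [List.append_assoc]
    · -- child loop finished (or depth budget exhausted): the frame pops
      rw [pvMachine.eq_def]
      dsimp only
      rw [dif_neg hg]
      have hres : pvResid nn adj d u p i s = (s, []) := by
        cases d with
        | zero => rfl
        | succ e =>
          show ((adj.getD u.toNat []).drop i).foldl _ (s, []) = (s, [])
          rw [List.drop_eq_nil_of_le (by omega)]
          rfl
      cases rest with
      | nil => simp [hres]
      | cons fr2 rs =>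
        obtain ⟨u2, p2, i2, s2, c2, d2⟩ := fr2
        simp [hres]

lemma pv_machine_spec (nn : Int) (adj : List (List (Int × Int))) (f : Nat) :
    pvMachine nn adj [(1, -1, 0, 1, 0, f)] [] = (pvDfsR nn adj f 1 (-1)).2 := by
  rw [pv_machine_eq nn adj (pvStackW adj [(1, -1, 0, 1, 0, f)]) 1 (-1) 0 1 0 f [] [] le_rfl]
  simp [pv_resid_full]

-- ---- per-cost sums of a contribution list ----

def pvSsum (sc : List (Int × Int)) (k : Int) : Int := ((sc.filter (fun t => t.1 = k)).map (·.2)).sum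

lemma pv_getD_dictOf : ∀ (l : List (Int × Int)) (d : PySem.Dict Int Int) (k : Int),
    (l.foldl pvUpd d).getD k 0 = d.getD k 0 + pvSsum l k := by
  intro l
  induction l with
  | nil => intro d k; simp [pvSsum]
  | cons cp l ih =>
    intro d k
    rw [List.foldl_cons, ih]
    unfold pvUpd
    rw [PySem.Dict.getD_modify]
    by_cases h : k = cp.1
    · subst h
      simp [pvSsum, add_assoc]
    · simp [pvSsum, h, Ne.symm h]

-- ---- aligning A's pop/carry loop with B's sorted grouped scan ----

lemma pv_Ssum_nil_of_all_ne (sc : List (Int × Int)) (e : Int) (h : ∀ t ∈ sc, ¬ t.1 = e) :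
    pvSsum sc e = 0 := by
  unfold pvSsum
  rw [List.filter_eq_nil_iff.2 (by intro t ht; simpa using h t ht)]
  rfl

lemma pv_consume_eq (e : Int) : ∀ (sc : List (Int × Int)) (v : Int),
    sc.Pairwise (fun a b => a.1 ≤ b.1) → (∀ t ∈ sc, e ≤ t.1) →
    pvConsume e sc v = (v + pvSsum sc e, sc.filter (fun t => ¬ t.1 = e)) := by
  intro sc
  induction sc with
  | nil => intro v _ _; simp [pvConsume, pvSsum]
  | cons cp t ih =>
    obtain ⟨c, p⟩ := cp
    intro v hp hb
    rw [List.pairwise_cons] at hp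
    by_cases hc : c = e
    · subst hc
      simp only [pvConsume]
      rw [ih (v + p) hp.2 (fun t ht => hb t (List.mem_cons_of_mem _ ht))]
      have h1 : pvSsum ((c, p) :: t) c = p + pvSsum t c := by
        simp [pvSsum]
      have h2 : ((c, p) :: t).filter (fun t => ¬ t.1 = c) = t.filter (fun t => ¬ t.1 = c) := by
        simp
      rw [h1, h2, add_assoc]
      simp
    · have hne : ∀ t' ∈ (c, p) :: t, ¬ t'.1 = e := by
        intro t' ht' hcon
        rcases List.mem_cons.1 ht' with h | h
        · subst h; exact hc hcon
        · have h1 := hp.1 t' h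
          have h2 := hb (c, p) (List.mem_cons_self ..)
          simp only at h1 h2
          have : e < c := lt_of_le_of_ne h2 (fun hh => hc hh.symm)
          omega
      simp only [pvConsume, if_neg hc]
      rw [pv_Ssum_nil_of_all_ne _ _ hne, add_zero,
        List.filter_eq_self.2 (by intro t' ht'; simpa using hne t' ht')]

lemma pv_get?_mk_filter_ne (i k : Int) : ∀ (l : List (Int × Int)),
    (PySem.Dict.mk (l.filter (fun p => !(p.1 == i)))).get? k =
      if k = i then none else (PySem.Dict.mk l).get? k := by
  intro l
  induction l with
  | nil =>
    by_cases h : k = i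
    · simp only [List.filter_nil, h, if_true]
      rfl
    · simp only [List.filter_nil, h, if_false]
  | cons a t ih =>
    rw [List.filter_cons]
    by_cases hai : a.1 = i
    · rw [if_neg (by simp [hai]), ih]
      by_cases hk : k = i
      · simp [hk]
      · rw [if_neg hk, if_neg hk, PySem.Dict.get?_mk_cons,
          if_neg (by simp [hai]; intro h; exact hk h.symm)]
    · rw [if_pos (by simp [hai]), PySem.Dict.get?_mk_cons, PySem.Dict.get?_mk_cons, ih]
      by_cases hk : k = i
      · rw [if_pos hk, if_pos hk,
          if_neg (by simp; intro h; rw [h, hk] at hai; exact hai rfl)]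
      · rw [if_neg hk, if_neg hk]

lemma pv_getD_erase (w : PySem.Dict Int Int) (i k : Int) :
    (w.erase i).getD k 0 = if k = i then 0 else w.getD k 0 := by
  obtain ⟨its⟩ := w
  rw [PySem.Dict.getD_eq_get?_getD, PySem.Dict.getD_eq_get?_getD]
  rw [show (PySem.Dict.mk its).erase i = PySem.Dict.mk (its.filter (fun p => !(p.1 == i))) from rfl]
  rw [pv_get?_mk_filter_ne]
  by_cases h : k = i <;> simp [h]

lemma pv_mem_keys_erase (w : PySem.Dict Int Int) (i k : Int) :
    k ∈ (w.erase i).keys ↔ (k ∈ w.keys ∧ k ≠ i) := by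
  simp only [PySem.Dict.keys, PySem.Dict.erase, List.mem_map, List.mem_filter]
  constructor
  · rintro ⟨p, ⟨hp, hpi⟩, hpk⟩
    simp at hpi
    exact ⟨⟨p, hp, hpk⟩, by rw [← hpk]; exact hpi⟩
  · rintro ⟨⟨p, hp, hpk⟩, hki⟩
    exact ⟨p, ⟨hp, by simp [hpk, hki]⟩, hpk⟩

lemma pv_Ssum_filter (sc : List (Int × Int)) (e k : Int) :
    pvSsum (sc.filter (fun t => ¬ t.1 = e)) k = if k = e then 0 else pvSsum sc k := by
  by_cases h : k = e
  · subst h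
    rw [if_pos rfl]
    refine pv_Ssum_nil_of_all_ne _ _ ?_
    intro t ht
    exact (by simpa using (List.mem_filter.1 ht).2)
  · rw [if_neg h]
    unfold pvSsum
    congr 1
    rw [List.filter_filter]
    congr 1
    refine List.filter_congr ?_
    intro t _
    by_cases ht : t.1 = k
    · simp [ht, h]
    · simp [ht]

lemma pv_joint : ∀ (f : Nat) (w : PySem.Dict Int Int) (sc : List (Int × Int)) (carry e : Int),
    (∀ k, w.getD k 0 = pvSsum sc k) →
    (∀ k, k ∈ w.keys ↔ k ∈ sc.map (·.1)) →
    sc.Pairwise (fun a b => a.1 ≤ b.1) →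
    (∀ t ∈ sc, e ≤ t.1) →
    pvCarryA f w carry e = pvEmit f sc carry e := by
  intro f
  induction f with
  | zero => intro w sc carry e _ _ _ _; rfl
  | succ f ih =>
    intro w sc carry e h1 h2 h3 h4
    have hsync : w.items = [] ↔ sc = [] := by
      constructor
      · intro h
        cases sc with
        | nil => rfl
        | cons t ts =>
          have hm : t.1 ∈ w.keys := (h2 t.1).2 (by simp)
          rw [show w.keys = w.items.map (·.1) from rfl, h] at hm
          simp at hm
      · intro h
        subst h
        cases hw : w.items with
        | nil => rfl
        | cons kv t =>
          have hm : kv.1 ∈ w.keys := by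
            rw [show w.keys = w.items.map (·.1) from rfl, hw]
            simp
          have := (h2 kv.1).1 hm
          simp at this
    simp only [pvCarryA, pvEmit]
    by_cases hstop : sc = [] ∧ carry = 0
    · rw [if_pos hstop, if_pos ⟨hsync.2 hstop.1, hstop.2⟩]
    · have hstop' : ¬ (w.items = [] ∧ carry = 0) := fun hcon => hstop ⟨hsync.1 hcon.1, hcon.2⟩
      rw [if_neg hstop', if_neg hstop]
      rw [pv_consume_eq e sc carry h3 h4]
      have hval : w.getD e 0 + carry = carry + pvSsum sc e := by
        rw [h1 e]; ring
      rw [hval]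
      congr 1
      refine ih (w.erase e) (sc.filter (fun t => ¬ t.1 = e)) _ (e + 1) ?_ ?_ ?_ ?_
      · intro k
        rw [pv_getD_erase, pv_Ssum_filter]
        by_cases hk : k = e
        · simp [hk]
        · simp [hk, h1 k]
      · intro k
        rw [pv_mem_keys_erase, h2 k]
        simp only [List.mem_map, List.mem_filter]
        constructor
        · rintro ⟨⟨p, hp, hpk⟩, hki⟩
          exact ⟨p, ⟨hp, by simp [hpk]; exact hki⟩, hpk⟩
        · rintro ⟨p, ⟨hp, hpe⟩, hpk⟩
          simp at hpe
          exact ⟨⟨p, hp, hpk⟩, by rw [← hpk]; exact hpe⟩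
      · exact List.Pairwise.sublist (List.filter_sublist ..) h3
      · intro t ht
        have h5 := h4 t (List.mem_filter.1 ht).1
        have h6 := (List.mem_filter.1 ht).2
        simp at h6
        omega

-- ---- provenance: all contribution costs (edge costs) are non-negative under Pre_ ----

def pvAdjOK (adj : List (List (Int × Int))) : Prop := ∀ l ∈ adj, ∀ vc ∈ l, 0 ≤ vc.2

lemma pv_adjOK_set (adj : List (List (Int × Int))) (k : Nat) (vc : Int × Int)
    (hadj : pvAdjOK adj) (hvc : 0 ≤ vc.2) :
    pvAdjOK (adj.set k (adj.getD k [] ++ [vc])) := by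
  intro l hl vc' hvc'
  rcases List.mem_or_eq_of_mem_set hl with h | h
  · exact hadj l h vc' hvc'
  · subst h
    rcases List.mem_append.1 hvc' with h | h
    · by_cases hk : k < adj.length
      · rw [List.getD_eq_getElem _ _ hk] at h
        exact hadj _ (adj.getElem_mem hk) _ h
      · rw [List.getD_eq_default _ _ (by omega)] at h
        simp at h
    · simp at h
      rw [h]
      exact hvc

lemma pv_kruskal_adjOK (n : Int) : ∀ (rows : List (List Int)) (par : List Int)
    (adj : List (List (Int × Int))) (cnt : Int),
    (∀ r ∈ rows, 0 ≤ r.getD 2 0) → pvAdjOK adj →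
    pvAdjOK (pvKruskal n rows par adj cnt) := by
  intro rows
  induction rows with
  | nil => intro par adj cnt _ hadj; exact hadj
  | cons row rest ih =>
    intro par adj cnt hrows hadj
    have hc : 0 ≤ row.getD 2 0 := hrows row (List.mem_cons_self ..)
    have hrest : ∀ r ∈ rest, 0 ≤ r.getD 2 0 := fun r hr => hrows r (List.mem_cons_of_mem _ hr)
    have hadj2 : pvAdjOK
        (((adj.set (row.getD 0 0).toNat (adj.getD (row.getD 0 0).toNat [] ++ [(row.getD 1 0, row.getD 2 0)]))).set
          (row.getD 1 0).toNat
          (((adj.set (row.getD 0 0).toNat (adj.getD (row.getD 0 0).toNat [] ++ [(row.getD 1 0, row.getD 2 0)]))).getD (row.getD 1 0).toNat []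
            ++ [(row.getD 0 0, row.getD 2 0)])) :=
      pv_adjOK_set _ _ _ (pv_adjOK_set _ _ _ hadj hc) hc
    simp only [pvKruskal]
    by_cases h1 : (pvUnion (n.toNat + 2) par (row.getD 0 0) (row.getD 1 0)).1
    · simp only [h1, if_true]
      by_cases h2 : cnt + 1 = n - 1
      · simp only [h2, if_true]
        exact hadj2
      · simp only [h2, if_false]
        exact ih _ _ _ hrest hadj2
    · simp only [h1]
      exact ih _ _ _ hrest hadj

lemma pv_dfsR_costs (nn : Int) (adj : List (List (Int × Int))) (hadj : pvAdjOK adj) :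
    ∀ (f : Nat) (u p : Int), ∀ cp ∈ (pvDfsR nn adj f u p).2, 0 ≤ cp.1 := by
  intro f
  induction f with
  | zero => intro u p cp hcp; simp [pvDfsR] at hcp
  | succ f ih =>
    intro u p cp hcp
    have hl : ∀ vc ∈ adj.getD u.toNat [], 0 ≤ vc.2 := by
      by_cases hk : u.toNat < adj.length
      · rw [List.getD_eq_getElem _ _ hk]
        exact hadj _ (adj.getElem_mem hk)
      · rw [List.getD_eq_default _ _ (by omega)]
        simp
    have aux : ∀ (l : List (Int × Int)), (∀ vc ∈ l, 0 ≤ vc.2) →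
        ∀ (s : Int) (cl : List (Int × Int)), (∀ q ∈ cl, 0 ≤ q.1) →
        ∀ q ∈ (l.foldl (pvStepR nn (fun v => pvDfsR nn adj f v u) p) (s, cl)).2, 0 ≤ q.1 := by
      intro l
      induction l with
      | nil => intro _ s cl hcl q hq; exact hcl q hq
      | cons vc l ihl =>
        intro hlv s cl hcl q hq
        by_cases h : vc.1 = p
        · rw [List.foldl_cons] at hq
          simp only [pvStepR, h, ne_eq, not_true_eq_false, if_false] at hq
          exact ihl (fun z hz => hlv z (List.mem_cons_of_mem _ hz)) s cl hcl q hq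
        · rw [List.foldl_cons] at hq
          simp only [pvStepR, ne_eq, h, not_false_eq_true, if_true] at hq
          refine ihl (fun z hz => hlv z (List.mem_cons_of_mem _ hz)) _ _ ?_ q hq
          intro q' hq'
          rcases List.mem_append.1 hq' with hq' | hq'
          · rcases List.mem_append.1 hq' with hq' | hq'
            · exact hcl q' hq'
            · exact ih vc.1 u q' hq'
          · simp at hq'
            rw [hq']
            exact hlv vc (List.mem_cons_self ..)
    simp only [pvDfsR] at hcp
    exact aux _ hl 1 [] (by simp) cp hcp

-- ---- equal fuels for the two digit loops ----

lemma pv_max?_isSome {α κ : Type} [LT κ] [DecidableLT κ] (xs : List α) (key : α → κ)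
    (h : xs ≠ []) : (PySem.List.max? xs key).isSome := by
  cases xs with
  | nil => exact absurd rfl h
  | cons x t =>
    unfold PySem.List.max?
    rw [List.foldl_cons]
    have aux : ∀ (l : List α) (a : α),
        (l.foldl (fun acc x =>
          match acc with
          | none => some x
          | some m => if key m < key x then some x else some m) (some a)).isSome := by
      intro l
      induction l with
      | nil => intro a; rfl
      | cons y l ihl =>
        intro a
        rw [List.foldl_cons]
        by_cases h : key a < key y
        · simpa [h] using ihl y
        · simpa [h] using ihl a
    exact aux t x

lemma pv_foldl_toNat : ∀ (l : List (Int × Int)) (a : Nat),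
    l.foldl (fun a kv => a + kv.2.toNat) a = a + (l.map (fun kv => kv.2.toNat)).sum := by
  intro l
  induction l with
  | nil => intro a; simp
  | cons kv t ih => intro a; rw [List.foldl_cons, ih]; simp; omega

lemma pv_maxKeyNat_congr (w₁ w₂ : PySem.Dict Int Int) (h1 : w₁.keys.Perm w₂.keys) :
    pvMaxKeyNat w₁ = pvMaxKeyNat w₂ := by
  unfold pvMaxKeyNat
  by_cases hn : w₁.keys = []
  · have hn2 : w₂.keys = [] := by
      rw [hn] at h1
      exact (List.Perm.nil_eq h1).symm
    rw [hn, hn2]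
  · have hn2 : w₂.keys ≠ [] := by
      intro h
      rw [h] at h1
      exact hn (List.Perm.eq_nil h1)
    obtain ⟨m₁, hm₁⟩ := Option.isSome_iff_exists.1 (pv_max?_isSome w₁.keys (fun x => x) hn)
    obtain ⟨m₂, hm₂⟩ := Option.isSome_iff_exists.1 (pv_max?_isSome w₂.keys (fun x => x) hn2)
    rw [hm₁, hm₂]
    have e1 : m₁ ≤ m₂ := PySem.List.max?_isMax hm₂ m₁ (h1.mem_iff.1 (PySem.List.max?_mem hm₁))
    have e2 : m₂ ≤ m₁ := PySem.List.max?_isMax hm₁ m₂ (h1.mem_iff.2 (PySem.List.max?_mem hm₂))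
    have : m₁ = m₂ := le_antisymm e1 e2
    rw [this]

lemma pv_fuel_congr (w₁ w₂ : PySem.Dict Int Int)
    (h1 : w₁.keys.Perm w₂.keys) (h2 : ∀ k, w₁.getD k 0 = w₂.getD k 0)
    (hn1 : w₁.keys.Nodup) (hn2 : w₂.keys.Nodup) :
    pvFuelA w₁ = pvFuelA w₂ := by
  unfold pvFuelA
  rw [pv_maxKeyNat_congr w₁ w₂ h1]
  have hg : pvG w₁ = pvG w₂ := by
    unfold pvG
    rw [pv_foldl_toNat, pv_foldl_toNat]
    rw [PySem.Dict.items_eq_map_keys w₁ hn1 0, PySem.Dict.items_eq_map_keys w₂ hn2 0]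
    rw [List.map_map, List.map_map]
    have hfun : ((fun kv : Int × Int => kv.2.toNat) ∘ fun k => (k, w₂.getD k 0))
        = ((fun kv : Int × Int => kv.2.toNat) ∘ fun k => (k, w₁.getD k 0)) := by
      funext k
      simp [h2 k]
    rw [hfun]
    rw [(h1.map ((fun kv : Int × Int => kv.2.toNat) ∘ fun k => (k, w₁.getD k 0))).sum_eq]
  rw [hg]

-- ===== VERDICT (by name: the statement is the Claim_ definition above) =====
-- unfolding the two ports without their `let` bindings (definitional)
def pvAdjOf (n : Int) (roads : List (List Int)) : List (List (Int × Int)) :=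
  pvKruskal n (PySem.List.sorted roads pvKey) (PySem.List.pyRange 0 (n + 1)) (List.replicate (n + 1).toNat []) 0

lemma pvA_unfold (n : Int) (roads : List (List Int)) :
    roadsInHackerland n roads =
      PySem.Str.join ""
        (pvCarryA
          (pvFuelA ((pvDfsA n (pvAdjOf n roads) (n.toNat + 2) 1 (-1) PySem.Dict.empty).2))
          ((pvDfsA n (pvAdjOf n roads) (n.toNat + 2) 1 (-1) PySem.Dict.empty).2)
          0 0).reverse := rfl

lemma pvB_unfold (n : Int) (roads : List (List Int)) :
    roadsInHackerland_alt n roads =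
      PySem.Str.join ""
        (pvEmit
          (pvFuelA ((PySem.List.sorted (pvMachine n (pvAdjOf n roads) [(1, -1, 0, 1, 0, n.toNat + 2)] []) (fun t => t.1)).foldl pvUpd PySem.Dict.empty))
          (PySem.List.sorted (pvMachine n (pvAdjOf n roads) [(1, -1, 0, 1, 0, n.toNat + 2)] []) (fun t => t.1))
          0 0).reverse := rfl

theorem roadsInHackerland_spec : Claim_equal_roadsInHackerland := by
  intro n roads _ hPre
  unfold Spec_roadsInHackerland
  rw [pvA_unfold, pvB_unfold]
  rw [pv_machine_spec]
  have hW : (pvDfsA n (pvAdjOf n roads) (n.toNat + 2) 1 (-1) PySem.Dict.empty).2 =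
      (pvDfsR n (pvAdjOf n roads) (n.toNat + 2) 1 (-1)).2.foldl pvUpd PySem.Dict.empty := by
    rw [pv_dfs_rel]
  rw [hW]
  set adj := pvAdjOf n roads with hadjdef
  set contribs := (pvDfsR n adj (n.toNat + 2) 1 (-1)).2 with hcdef
  set sc := PySem.List.sorted contribs (fun t : Int × Int => t.1) with hscdef
  set w1 := contribs.foldl pvUpd PySem.Dict.empty with hw1def
  set w2 := sc.foldl pvUpd PySem.Dict.empty with hw2def
  have hperm : sc.Perm contribs := PySem.List.sorted_perm ..
  have hadjOK : pvAdjOK adj := by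
    rw [hadjdef]
    unfold pvAdjOf
    refine pv_kruskal_adjOK n _ _ _ _ (fun r hr => ?_) (fun l hl => ?_)
    · exact (hPre.2 r ((PySem.List.mem_sorted _ _ _ _).1 hr)).2.2.2.2.2
    · have := List.eq_of_mem_replicate hl
      subst this
      simp
  have hcost : ∀ t ∈ contribs, 0 ≤ t.1 := fun t ht =>
    pv_dfsR_costs n adj hadjOK (n.toNat + 2) 1 (-1) t ht
  have hkeys1 : w1.keys = PySem.Set.ofList (contribs.map (·.1)) := by
    rw [hw1def]
    unfold pvUpd
    rw [PySem.Dict.keys_foldl_modify_key contribs (fun cp : Int × Int => cp.1) 0 (fun _ cp => (· + cp.2))]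
    rfl
  have hkeys2 : w2.keys = PySem.Set.ofList (sc.map (·.1)) := by
    rw [hw2def]
    unfold pvUpd
    rw [PySem.Dict.keys_foldl_modify_key sc (fun cp : Int × Int => cp.1) 0 (fun _ cp => (· + cp.2))]
    rfl
  have hn1 : w1.keys.Nodup := by rw [hkeys1]; exact PySem.Set.nodup_ofList _
  have hn2 : w2.keys.Nodup := by rw [hkeys2]; exact PySem.Set.nodup_ofList _
  have hmem1 : ∀ k, k ∈ w1.keys ↔ k ∈ contribs.map (·.1) := by
    intro k; rw [hkeys1]; exact PySem.Set.mem_ofList ..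
  have hmem2 : ∀ k, k ∈ w2.keys ↔ k ∈ sc.map (·.1) := by
    intro k; rw [hkeys2]; exact PySem.Set.mem_ofList ..
  have hkeysperm : w1.keys.Perm w2.keys := by
    rw [List.perm_ext_iff_of_nodup hn1 hn2]
    intro k
    rw [hmem1, hmem2, (hperm.map (·.1)).mem_iff]
  have hss : ∀ k, pvSsum sc k = pvSsum contribs k := by
    intro k
    unfold pvSsum
    exact ((hperm.filter _).map _).sum_eq
  have hgetD1 : ∀ k, w1.getD k 0 = pvSsum sc k := by
    intro k
    rw [hw1def, pv_getD_dictOf, hss k]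
    simp
  have hgetD : ∀ k, w1.getD k 0 = w2.getD k 0 := by
    intro k
    rw [hgetD1 k, hw2def, pv_getD_dictOf]
    simp
  have hfuel : pvFuelA w1 = pvFuelA w2 := pv_fuel_congr w1 w2 hkeysperm hgetD hn1 hn2
  rw [← hfuel]
  have hjoint := pv_joint (pvFuelA w1) w1 sc 0 0 hgetD1
    (fun k => by rw [hmem1 k, (hperm.map (·.1)).mem_iff])
    (PySem.List.sorted_pairwise ..)
    (fun t ht => hcost t (hperm.subset ht))
  rw [hjoint]
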